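/- GENERATED by mk_final_copies.py from the proof of the farm's unit `start_decoder.4` (farm:start_decoder.4.1: Lemmas.lean) as the
   re-elaboration sweep compiled it — do not edit. -/
import Asan.CheckWalk
import Vorbis.Spec.StartDecoderATest
import Vorbis.Spec.Units.start_decoder_4

namespace Vorbis.Spec.start_decoder_4
open X86 X86.User Asan Vorbis Vorbis.Spec Vorbis.Spec.StartDecoder

/-- The steady stack pointer of `start_decoder`, spelled over the entry state's rsp (the form the walker and the frame tactics
read: every stack address of the segment is `g.e.reg .rsp - k`). -/
theorem rsp_eq {u₀ : State} {g : Ghost} {pc : Word} {A : Arena × List Obj} {v : State} (fr : Frame u₀ g pc A v) :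
    v.reg .rsp = g.e.reg .rsp - 1480 := by
  have h1 := fr.ra
  rw [fr.rsp]
  unfold Ghost.R Ghost.RA at *
  simp only [steady, depth] at *
  rw [← Vorbis.addr_sub_addr _ _ (by omega), Vorbis.addr_toNat]
  rfl

/-- `rbp = f`, spelled as the entry state's argument register. -/
theorem addr_f (g : Ghost) : addr g.f = g.e.reg .rdi := by
  unfold Ghost.f
  exact Vorbis.addr_toNat _

/-- **Where things are**, as arithmetic over `g.RA`, `g.R`, `g.f` (for `omega`): the stack of the activation, and the decoder
object `*f` — a stack object of a CALLER's frame (above the return-address slot) or off the stack region; above the input, below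
the shadow (`Bits.OBR`). -/
structure Pos (g : Ghost) : Prop where
  ra8 : g.RA % 8 = 0
  lo : 0x700000 + 1888 ≤ g.RA
  hi : g.RA + 8 ≤ 0x800000
  r : g.R + 1480 = g.RA
  objStack : g.RA + 8 ≤ g.f ∨ g.f + 1808 ≤ 0x700000 ∨ 0x800000 ≤ g.f
  objLo : 0x400000 ≤ g.f
  objHi : g.f + 1808 ≤ 0xC00000

/-- `Pos` at a cut point: the stack from `Frame.ra`, `*f` from the hand-over carrier (`*f` lies inside ONE object of the callers'
frames or of `A.2`), the callers' frames above the return address (`Frame.callers`), `Bits.OBR`. -/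
theorem pos_of {u₀ : State} {g : Ghost} {pc : Word} {A : Arena × List Obj} {v : State} {Blk : Block → Prop} {mem : Mem}
    (fr : Frame u₀ g pc A v) (hh : g.Hand A) (hb : Bits Blk g.len mem g.f) : Pos g := by
  obtain ⟨h1, h2, h3⟩ := fr.ra
  obtain ⟨h4, h5⟩ := fr.r_eq
  obtain ⟨k1, k2⟩ := hb.OBR
  simp only [depth] at h2
  simp only [steady] at h4
  simp only [Off.sizeof.stb_vorbis] at k2
  refine ⟨h1, h2, h3, h4, ?_, k1, k2⟩
  obtain ⟨o, ho, o1, o2⟩ := hh.obj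
  simp only [Off.sizeof.stb_vorbis] at o2
  rcases List.mem_append.mp ho with hs | hoth
  · -- a stack object of a caller's protected frame: the frame lies above the return-address slot
    unfold stackObjs at hs
    obtain ⟨bF, hbF, hin⟩ := List.mem_flatMap.mp hs
    have hbF' : bF ∈ g.frames' := List.mem_cons_of_mem _ hbF
    obtain ⟨a1, a2, _, _, _⟩ := fr.shadow.stack.active bF hbF'
    obtain ⟨g1, _⟩ := FrameLayout.objsAt_gran a1 a2 hin
    have hc := fr.callers bF hbF
    have e : o.gLo = o.base / 8 := rfl
    left
    omega
  · -- any other object is off the stack region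
    have hoff := fr.shadow.off o hoth
    unfold OffStack at hoff
    right
    omega

/-- **The footprint of the segment**: the callees' stack below the steady rsp (`[RA − 1888, RA − 1480)`), and the windows of `*f`
that the four readers and `error` write — `stream` [48,56), `p_first` [84,96), `eof` + `error` [136,144), the paging fields
`last_page` … `bytes_in_seg` [1484,1749), `next_seg` … `known_loc_for_packet` [1752,1784). An abbreviation of a LITERAL list: the
frame tactics (`u_same`) see through it after `unfold SegWins`. -/
abbrev SegWins (g : Ghost) : List Span :=
      [⟨(g.e.reg .rsp).toNat - 1888, (g.e.reg .rsp).toNat - 1480⟩,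
       ⟨(g.e.reg .rdi).toNat + 48, (g.e.reg .rdi).toNat + 56⟩, ⟨(g.e.reg .rdi).toNat + 84, (g.e.reg .rdi).toNat + 96⟩,
       ⟨(g.e.reg .rdi).toNat + 136, (g.e.reg .rdi).toNat + 144⟩, ⟨(g.e.reg .rdi).toNat + 1484, (g.e.reg .rdi).toNat + 1749⟩,
       ⟨(g.e.reg .rdi).toNat + 1752, (g.e.reg .rdi).toNat + 1784⟩]

/-- The stack pointer at the entry of a callee of the segment, as a number. -/
theorem toNat_callee_rsp {g : Ghost} (P : Pos g) : (g.e.reg .rsp - 1488).toNat = g.RA - 1488 := by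
  obtain ⟨p1, p2, p3, p4, p5, p6, p7⟩ := P
  unfold Ghost.RA at *
  u_omega

/-- **Agreement off the segment's footprint** (the callees' stack below the steady rsp, the readers' windows of `*f`, `error`'s
window): any range that misses the six windows reads the same. -/
theorem eqOn_off {g : Ghost} {m m' : Mem}
    (hs : Mem.SameExcept (SegWins g) m m')
    (lo hi : Nat)
    (h0 : hi ≤ g.RA - 1888 ∨ g.RA - 1480 ≤ lo) (h1 : hi ≤ g.f + 48 ∨ g.f + 56 ≤ lo) (h2 : hi ≤ g.f + 84 ∨ g.f + 96 ≤ lo)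
    (h3 : hi ≤ g.f + 136 ∨ g.f + 144 ≤ lo) (h4 : hi ≤ g.f + 1484 ∨ g.f + 1749 ≤ lo)
    (h5 : hi ≤ g.f + 1752 ∨ g.f + 1784 ≤ lo) : Mem.EqOn lo hi m m' := by
  apply hs.eqOn
  intro w hw
  unfold Ghost.RA at h0
  unfold Ghost.f at h1 h2 h3 h4 h5
  simp only [List.mem_cons, List.mem_nil_iff, or_false] at hw
  rcases hw with rfl | rfl | rfl | rfl | rfl | rfl
  all_goals
    simp only []
    omega

/-- **No shadow byte lies in the segment's footprint** (the stack and `*f` are below `C00000H`). -/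
theorem untouched_of {g : Ghost} {m m' : Mem} (P : Pos g)
    (hs : Mem.SameExcept (SegWins g) m m') : ShadowUntouched m m' := by
  obtain ⟨p1, p2, p3, p4, p5, p6, p7⟩ := P
  unfold ShadowUntouched
  apply eqOn_off hs
  all_goals omega

/-- The push of a call's return address (at the steady rsp − 8) writes no shadow byte. -/
theorem untouched_push {g : Ghost} {m0 m : Mem} (P : Pos g) (hun : ShadowUntouched m0 m) (x : Nat) :
    ShadowUntouched m0 (m.writeLE (g.e.reg .rsp - 1488) 8 x) := by
  have e := toNat_callee_rsp P
  obtain ⟨p1, p2, p3, p4, p5, p6, p7⟩ := P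
  unfold ShadowUntouched at *
  apply Mem.EqOn.step_writeLE _ _ _ hun
  · rw [e]
    omega
  · rw [e]
    omega

/-- **THE CARRY LEMMA OF THE SEGMENT**: from the entry assertion's `Frame` and `SD 1` at the state `v` to a later state `w` of the
segment, whose memory differs from `v`'s only inside the segment's footprint — the callees' stack below the steady rsp and the
windows of `*f` that the four readers and `error` write (`stream`, `p_first`, `eof` + `error`, the paging fields, `next_seg` …
`known_loc_for_packet`) —, with no shadow byte written, and `Bits f` re-established by the last callee's post. Every other clause
of `Frame` and of `SD 1` reads bytes off that footprint. -/
theorem seg_carry {u₀ : State} {g : Ghost} {pc pc' : Word} {A : Arena × List Obj} {v w : State}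
    (fr : Frame u₀ g pc A v) (hh : g.Hand A)
    (sd : Real.SD g.len 1 A (g.Blk A) (g.Live A) v.mem g.f g.R)
    (hrip : w.rip = pc') (hrsp : w.reg .rsp = g.e.reg .rsp - 1480)
    (hcode : CodeOK u₀ w.mem) (hinv : abiInv w)
    (hs : Mem.SameExcept (SegWins g) v.mem w.mem)
    (hun : ShadowUntouched v.mem w.mem)
    (hb : Bits (g.Blk A) g.len w.mem g.f) :
    Frame u₀ g pc' A w ∧ Real.SD g.len 1 A (g.Blk A) (g.Live A) w.mem g.f g.R := by
  obtain ⟨p1, p2, p3, p4, p5, p6, p7⟩ := pos_of fr hh sd.bits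
  -- the own frame above the steady rsp, with the return-address slot
  have hE : Mem.EqOn g.R (g.RA + 8) v.mem w.mem := by
    apply eqOn_off hs
    all_goals omega
  constructor
  · -- `Frame`
    refine
      { entry := fr.entry
        rip := hrip
        rsp := hrsp.trans ((rsp_eq fr).symm.trans fr.rsp)
        shadowIdx := ?_
        saved_rbx := ?_
        saved_rbp := ?_
        saved_r12 := ?_
        saved_r13 := ?_
        saved_r14 := ?_
        saved_r15 := ?_
        saved_ra := ?_
        code := hcode
        inv := hinv
        shadow := fr.shadow.untouched hun
        offText := fr.offText
        ext := fr.ext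
        callers := fr.callers
        sh7 := ?_
        same := ?_ }
    · rw [hE.u64 (g.R + 8) (by omega) (by omega) (by omega)]
      exact fr.shadowIdx
    · rw [hE.u64 (g.R + 0x598) (by omega) (by omega) (by omega)]
      exact fr.saved_rbx
    · rw [hE.u64 (g.R + 0x5a0) (by omega) (by omega) (by omega)]
      exact fr.saved_rbp
    · rw [hE.u64 (g.R + 0x5a8) (by omega) (by omega) (by omega)]
      exact fr.saved_r12
    · rw [hE.u64 (g.R + 0x5b0) (by omega) (by omega) (by omega)]
      exact fr.saved_r13
    · rw [hE.u64 (g.R + 0x5b8) (by omega) (by omega) (by omega)]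
      exact fr.saved_r14
    · rw [hE.u64 (g.R + 0x5c0) (by omega) (by omega) (by omega)]
      exact fr.saved_r15
    · rw [hE.u64 (g.R + 0x5c8) (by omega) (by omega) (by omega)]
      exact fr.saved_ra
    · -- SH7: the global `log2_4` lies below `*f` and below the stack
      have hL : Mem.EqOn 0x120640 0x120650 v.mem w.mem := by
        apply eqOn_off hs
        all_goals omega
      intro i hi
      have e : w.mem.u8 (0x120640 + i) = v.mem.u8 (0x120640 + i) := hL.u8 (0x120640 + i) (by omega) (by omega) (by omega)
      have e' : w.mem.readLE (UInt64.ofNat (Vorbis.Globals.log2_4.beg + i)) 1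
          = v.mem.readLE (UInt64.ofNat (Vorbis.Globals.log2_4.beg + i)) 1 := e
      rw [e']
      exact fr.sh7 i hi
    · -- the function's footprint: the segment's windows lie inside the stack window and `*f`
      apply fr.same.step_same hs
      intro s hs' a h1 h2
      unfold Ghost.RA Ghost.f at *
      simp only [List.mem_cons, List.mem_nil_iff, or_false] at hs'
      unfold StartDecoder.footprint StartDecoder.writes
      rcases hs' with rfl | rfl | rfl | rfl | rfl | rfl
      · refine ⟨_, List.mem_cons_self, ?_, ?_⟩
        · simp only [depth] at *
          unfold Ghost.RA
          omega
        · simp only [] at *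
          unfold Ghost.RA
          omega
      all_goals
        refine ⟨_, List.mem_cons_of_mem _ List.mem_cons_self, ?_, ?_⟩
        · simp only [vblock, voff] at *
          omega
        · simp only [vblock, voff] at *
          omega
  · -- `SD 1`
    have hf64 : g.f + Off.sizeof.stb_vorbis ≤ 2 ^ 64 := by
      simp only [voff]
      omega
    have hw := SDw.of_sd sd
    refine SDw.toSD (k := 1)
      { env := sd.env.eqOn hun
        frame := ?_
        arena := ?_
        setups := hw.setups
        bits := hb
        first := ?_
        discard0 := ?_
        header := ?_
        cb0 := fun h3 => absurd h3 (by omega)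
        rest := ?_ } (by omega) sd.noTemps ?_ (fun h2 => absurd h2 (by omega))
    · apply sd.frame.frame
      · apply eqOn_off hs
        all_goals omega
      · omega
    · apply hw.arena.frame hf64
      simp only [voff]
      apply eqOn_off hs
      all_goals omega
    · have e : Mem.EqOn (g.f + 1749) (g.f + 1750) v.mem w.mem := by
        apply eqOn_off hs
        all_goals omega
      have h1 := sd.first
      simp only [vacc, voff] at h1 ⊢
      rw [e.u8 (g.f + 1749) (by omega) (by omega) (by omega)]
      exact h1
    · have e : Mem.EqOn (g.f + 1784) (g.f + 1788) v.mem w.mem := by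
        apply eqOn_off hs
        all_goals omega
      have h1 := sd.discard0
      simp only [vacc, voff] at h1 ⊢
      rw [e.i32 (g.f + 1784) (by omega) (by omega) (by omega)]
      exact h1
    · intro h1
      apply (hw.header h1).transfer
      apply ObjEq.of_eqOn
      · intro x hx
        simp only [HeaderOK.wins, List.mem_cons, List.mem_nil_iff, or_false] at hx
        rcases hx with rfl | rfl
        all_goals
          simp only []
          omega
      · intro x hx
        simp only [HeaderOK.wins, List.mem_cons, List.mem_nil_iff, or_false] at hx
        rcases hx with rfl | rfl
        all_goals
          simp only []
          apply eqOn_off hs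
          all_goals omega
    · have h1 := sd.rest
      have e : restFrom 1 = 160 := by decide
      rw [e] at h1 ⊢
      unfold RestZero at h1 ⊢
      simp only [voff] at h1 ⊢
      apply h1.frame
      · apply eqOn_off hs
        all_goals omega
      · omega
    · intro h1
      have h2 := sd.commentZero h1
      simp only [voff] at h2 ⊢
      apply h2.frame
      · apply eqOn_off hs
        all_goals omega
      · omega

/-- **The return address of a call of the segment is pushed off `*f`**: `Bits f` is kept. -/
theorem bits_push {g : Ghost} {Blk : Block → Prop} {m : Mem} (P : Pos g) (hb : Bits Blk g.len m g.f) (x : Nat) :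
    Bits Blk g.len (m.writeLE (g.e.reg .rsp - 1488) 8 x) g.f := by
  have e := toNat_callee_rsp P
  obtain ⟨p1, p2, p3, p4, p5, p6, p7⟩ := P
  refine (Reader.store_off_obj hb _ 8 x ?_ ?_).1.bits
  · rw [e]
    omega
  · rw [e]
    omega

/-- **`error(f, VORBIS_invalid_setup)` keeps `Bits f`**: its footprint — 48 bytes of stack below the pushed return address and
`f->error` (`[f + 140, f + 144)`) — misses the fields `Bits` reads. `hs` is the `w_same` of the call, over the memory with the
return address pushed. -/
theorem bits_error {g : Ghost} {Blk : Block → Prop} {m m' : Mem} (P : Pos g) (hb : Bits Blk g.len m g.f) (x : Nat)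
    (hs : Mem.SameExcept
      [⟨(g.e.reg .rsp - 1488).toNat - 48, (g.e.reg .rsp - 1488).toNat⟩,
       ⟨(g.e.reg .rdi).toNat + 140, (g.e.reg .rdi).toNat + 140 + 4⟩]
      (m.writeLE (g.e.reg .rsp - 1488) 8 x) m') : Bits Blk g.len m' g.f := by
  have hb' := bits_push P hb x
  have e := toNat_callee_rsp P
  obtain ⟨p1, p2, p3, p4, p5, p6, p7⟩ := P
  rw [e] at hs
  unfold Ghost.RA Ghost.f at *
  apply hb'.frame_fields
  apply Bits.SameFields.of_sameExcept hs
  all_goals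
    intro w hw
    simp only [List.mem_cons, List.mem_nil_iff, or_false] at hw
    rcases hw with rfl | rfl
    all_goals
      simp only []
      omega

/-- **The precondition of every reader the segment calls** (`start_page`, `start_packet`, `next_segment`, `get8_packet`) at the
callee's entry state `s`: rsp = the steady rsp − 8 (the pushed return address), rdi = f, no shadow byte written since the cut point,
`Bits f` in the present memory. -/
theorem readerPre_at {u₀ : State} {g : Ghost} {pc : Word} {A : Arena × List Obj} {v s : State}
    (fr : Frame u₀ g pc A v) (hh : g.Hand A) (hl : BlkLive (g.Blk A) (g.Live A))
    (hrsp : s.reg .rsp = g.e.reg .rsp - 1488) (hrdi : s.reg .rdi = g.e.reg .rdi)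
    (hun : ShadowUntouched v.mem s.mem) (hb : Bits (g.Blk A) g.len s.mem g.f) :
    ReaderPre A.2 g.frames' (g.Blk A) g.len s := by
  have P := pos_of fr hh hb
  have e := toNat_callee_rsp P
  obtain ⟨p1, p2, p3, p4, p5, p6, p7⟩ := P
  have ef : (s.reg .rdi).toNat = g.f := by
    rw [hrdi]
    rfl
  refine ⟨⟨?_, fr.offText⟩, ?_, ?_⟩
  · have et : (s.reg .rsp).toNat + 8 = g.R := by
      rw [hrsp, e]
      omega
    rw [et]
    exact fr.shadow.untouched hun
  · rw [ef]
    exact readerEnv hh hl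
  · rw [ef]
    exact hb

/-- `next_seg` is not changed by the push of a return address. -/
theorem next_seg_push {g : Ghost} {m : Mem} (P : Pos g) (x : Nat) :
    stb_vorbis.next_seg (m.writeLE (g.e.reg .rsp - 1488) 8 x) g.f = stb_vorbis.next_seg m g.f := by
  have e := toNat_callee_rsp P
  obtain ⟨p1, p2, p3, p4, p5, p6, p7⟩ := P
  have hs : Mem.EqOn g.f (g.f + 1808) m (m.writeLE (g.e.reg .rsp - 1488) 8 x) :=
    Mem.eqOn_writeLE m _ 8 x g.f 1808 (by omega) (by omega)
  simp only [vacc, voff]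
  exact hs.i32 _ (by omega) (by omega) (by omega)

/-- **An error exit of the segment**: the epilogue's assertion from the carried `Frame` and `SD 1`, with eax = 0 (`Failed.of_sd`). -/
theorem exit_err {u₀ : State} {g : Ghost} {A : Arena × List Obj} {w : State}
    (fr : Frame u₀ g pc_ERR A w) (hh : g.Hand A)
    (sd : Real.SD g.len 1 A (g.Blk A) (g.Live A) w.mem g.f g.R)
    (hax : (w.reg .rax).toNat % 2 ^ 32 = 0) : AtERR u₀ g w :=
  ⟨A, fr, hh, Or.inl ⟨hax, Failed.of_sd sd⟩⟩

/-- **A `test eax, eax ; je 113b22` exit of the segment** (lines 3669, 3671, 3673: `return FALSE` after a reader returned 0): the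
state `w` after the taken jump has the memory `m` the reader returned (inside the segment's footprint of the cut point's, `Bits f`
from the reader's post) and eax = 0. -/
theorem exit_je {u₀ : State} {g : Ghost} {pc : Word} {A : Arena × List Obj} {v w : State} {m : Mem} {z : Word}
    (fr : Frame u₀ g pc A v) (hh : g.Hand A)
    (sd : Real.SD g.len 1 A (g.Blk A) (g.Live A) v.mem g.f g.R)
    (hrip : w.rip = pc_ERR) (hrsp : w.reg .rsp = g.e.reg .rsp - 1480)
    (hcode : CodeOK u₀ w.mem) (hinv : abiInv w) (hmem : w.mem = m)
    (hs : Mem.SameExcept (SegWins g) v.mem m) (hb : Bits (g.Blk A) g.len m g.f)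
    (hrax : w.reg .rax = z) (hbr : (Word.part .w32 z).toNat = 0) : AtERR u₀ g w := by
  have P := pos_of fr hh sd.bits
  rw [← hmem] at hs hb
  obtain ⟨fr', sd'⟩ := seg_carry fr hh sd hrip hrsp hcode hinv hs (untouched_of P hs) hb
  refine exit_err fr' hh sd' ?_
  rw [hrax, ← Vorbis.toNat_part32]
  exact hbr

/-- **The exit to the head of loop 3676** (`i = 0` in r13d, rbp = f): `At5` from the carried `Frame` and `SD 1`. -/
theorem exit_loop {u₀ : State} {g : Ghost} {A : Arena × List Obj} {w : State}
    (fr : Frame u₀ g pc_5 A w) (hh : g.Hand A)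
    (sd : Real.SD g.len 1 A (g.Blk A) (g.Live A) w.mem g.f g.R)
    (hrbp : w.reg .rbp = g.e.reg .rdi) (hr13 : w.reg .r13 = 0) : At5 u₀ g w :=
  ⟨A, 0,
    { frame := fr
      hand := hh
      rbp := hrbp.trans (addr_f g).symm
      sd := sd
      r13 := hr13
      i_le := by omega }⟩

end Vorbis.Spec.start_decoder_4
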